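-- pv_equiv track=rewrite | github.com/Griff10IX/Mafia-game | backend/routers/bodyguards.py | _camelize
-- ===== SOURCE A (Python) =====
-- def _camelize(name: str) -> str:
--     parts = []
--     for ch in (name or ""):
--         if ch.isalnum() or ch == " ":
--             parts.append(ch)
--     cleaned = "".join(parts)
--     tokens = [t for t in cleaned.replace("_", " ").split(" ") if t]
--     return "".join(t[:1].upper() + t[1:] for t in tokens)
-- ===== SOURCE B (Python) =====
-- def _camelize(name: str) -> str:
--     out = []
--     buf = ""
--     for ch in (name or ""):
--         if ch.isalnum():
--             buf += ch
--         elif ch == " ":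
--             if buf:
--                 out.append(buf[:1].upper() + buf[1:])
--             buf = ""
--         # any other character is dropped and does NOT break the current token
--     if buf:
--         out.append(buf[:1].upper() + buf[1:])
--     return "".join(out)
-- ===== Notes on version B (the rewrite author's own statement) =====
-- stated objective: alternative
-- what changed: Replaces A's four-stage pipeline (filter chars into a list, join, replace/split on spaces, capitalize tokens) by a single pass over the characters that maintains a token buffer, flushing it capitalized at each space and ignoring other non-alphanumeric characters.
import Mathlib
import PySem

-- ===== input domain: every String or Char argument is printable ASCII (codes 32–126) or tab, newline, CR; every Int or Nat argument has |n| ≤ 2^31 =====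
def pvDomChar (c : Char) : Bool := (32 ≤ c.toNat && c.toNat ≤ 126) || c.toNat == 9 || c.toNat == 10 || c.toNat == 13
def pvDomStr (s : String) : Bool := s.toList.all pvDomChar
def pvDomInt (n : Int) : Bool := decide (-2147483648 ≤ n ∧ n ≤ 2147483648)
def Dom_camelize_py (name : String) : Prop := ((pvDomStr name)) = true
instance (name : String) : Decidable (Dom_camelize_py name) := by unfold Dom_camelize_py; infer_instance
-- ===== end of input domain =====

-- B replaces A's filter/replace/split/join pipeline by a single pass over the characters
-- with a token buffer (objective: alternative decomposition; return value identical).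

-- t[:1].upper() + t[1:]  (shared by both Pythons verbatim)
def pvCap (t : List Char) : List Char :=
  PySem.Chars.upper (PySem.List.slice t none (some 1)) ++ PySem.List.slice t (some 1) none

-- ===== PORT A =====
def camelize_py (name : String) : String :=
  let parts : List Char :=
    name.toList.foldl
      (fun acc ch => if PySem.Chars.isalnum ch || ch == ' ' then acc ++ [ch] else acc) []
  let cleaned : List Char := PySem.Chars.join [] (parts.map (fun c => [c]))
  let tokens : List (List Char) :=
    (PySem.Chars.splitOn (PySem.Chars.replace cleaned ['_'] [' ']) [' ']).filter
      (fun t => !t.isEmpty)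
  String.ofList (PySem.Chars.join [] (tokens.map pvCap))

-- ===== PORT B =====
def camelizeGo : List Char → List Char → List (List Char) → List (List Char)
  | [], buf, out => if buf.isEmpty then out else out ++ [pvCap buf]
  | ch :: rest, buf, out =>
    if PySem.Chars.isalnum ch then camelizeGo rest (buf ++ [ch]) out
    else if ch == ' ' then
      camelizeGo rest [] (if buf.isEmpty then out else out ++ [pvCap buf])
    else camelizeGo rest buf out

def camelize_py_alt (name : String) : String :=
  String.ofList (PySem.Chars.join [] (camelizeGo name.toList [] []))

-- ===== PRECONDITION & SPEC =====
def Spec_camelize_py (name : String) (out : String) : Prop := out = camelize_py_alt name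
instance (name : String) (out : String) : Decidable (Spec_camelize_py name out) := by unfold Spec_camelize_py; infer_instance

-- ===== CLAIM (what is proved, stated in full; the proofs are below) =====
def Claim_equal_camelize_py : Prop := ∀ (name : String), Dom_camelize_py name → Spec_camelize_py name (camelize_py name)

-- ===== LEMMAS AND PROOFS =====

-- the character class A keeps
def pvKeep (ch : Char) : Bool := PySem.Chars.isalnum ch || ch == ' '

-- structural form of str.split(" ") : accumulate the current token, flush at each space
def pvConsume : List Char → List Char → List (List Char)
  | [], cur => [cur]
  | c :: rest, cur => if c = ' ' then cur :: pvConsume rest [] else pvConsume rest (cur ++ [c])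

lemma pv_replace_go_id (l : List Char) : ∀ (fuel : Nat) (acc : List Char),
    l.length ≤ fuel → '_' ∉ l →
    PySem.Chars.replace.go ['_'] [' '] fuel l acc = acc.reverse ++ l := by
  induction l with
  | nil => intro fuel acc _ _; cases fuel <;> simp [PySem.Chars.replace.go]
  | cons c t ih =>
    intro fuel acc hf hm
    cases fuel with
    | zero => simp at hf
    | succ f =>
      have hc : c ≠ '_' := by intro h; exact hm (h ▸ List.mem_cons_self)
      have hpre : List.isPrefixOf ['_'] (c :: t) = false := by
        simp [List.isPrefixOf]; exact fun h => (hc h.symm).elim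
      rw [PySem.Chars.replace.go, hpre]
      simp only [Bool.false_eq_true, if_false]
      rw [ih f (c :: acc) (by simpa using hf) (fun h => hm (List.mem_cons_of_mem _ h))]
      simp

lemma pv_replace_id (l : List Char) (h : '_' ∉ l) :
    PySem.Chars.replace l ['_'] [' '] = l := by
  simp [PySem.Chars.replace, pv_replace_go_id l l.length [] le_rfl h]

lemma pv_splitOn_go_spec (l : List Char) : ∀ (fuel : Nat) (cur : List Char) (acc : List (List Char)),
    l.length ≤ fuel →
    PySem.Chars.splitOn.go [' '] fuel l cur acc = acc.reverse ++ pvConsume l cur.reverse := by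
  induction l with
  | nil => intro fuel cur acc _; cases fuel <;> simp [PySem.Chars.splitOn.go, pvConsume]
  | cons c t ih =>
    intro fuel cur acc hf
    cases fuel with
    | zero => simp at hf
    | succ f =>
      by_cases hc : c = ' '
      · subst hc
        have hpre : List.isPrefixOf [' '] (' ' :: t) = true := by simp [List.isPrefixOf]
        rw [PySem.Chars.splitOn.go, hpre]
        simp only [if_true]
        have hd : List.drop [' '].length (' ' :: t) = t := rfl
        rw [hd, ih f [] (cur.reverse :: acc) (by simpa using hf)]
        simp [pvConsume]
      · have hpre : List.isPrefixOf [' '] (c :: t) = false := by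
          simp [List.isPrefixOf]; exact fun h => (hc h.symm).elim
        rw [PySem.Chars.splitOn.go, hpre]
        simp only [Bool.false_eq_true, if_false]
        rw [ih f (c :: cur) acc (by simpa using hf)]
        simp [pvConsume, hc]

lemma pv_splitOn_eq (l : List Char) :
    PySem.Chars.splitOn l [' '] = pvConsume l [] := by
  simpa using pv_splitOn_go_spec l (l.length + 1) [] [] (by omega)

-- main invariant of B's single pass
lemma pv_go_spec (cs : List Char) : ∀ (buf : List Char) (out : List (List Char)),
    camelizeGo cs buf out =
      out ++ ((pvConsume (cs.filter pvKeep) buf).filter (fun t => !t.isEmpty)).map pvCap := by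
  induction cs with
  | nil =>
    intro buf out
    cases buf <;> simp [camelizeGo, pvConsume, List.filter, List.map]
  | cons c t ih =>
    intro buf out
    by_cases ha : PySem.Chars.isalnum c = true
    · have hk : pvKeep c = true := by simp [pvKeep, ha]
      have hcs : c ≠ ' ' := by
        intro h; subst h; exact absurd ha (by decide)
      simp only [camelizeGo, ha, if_true, List.filter_cons, hk]
      rw [ih]
      simp [pvConsume, hcs]
    · by_cases hs : c = ' '
      · subst hs
        have hk : pvKeep ' ' = true := by simp [pvKeep]
        simp only [camelizeGo, ha, Bool.false_eq_true, if_false]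
        cases hbuf : buf.isEmpty
        · have hne : buf ≠ [] := by simpa [List.isEmpty_iff] using hbuf
          simp only [if_false, Bool.false_eq_true]
          rw [ih]
          simp [hk, pvConsume, hne]
        · have hb : buf = [] := by simpa [List.isEmpty_iff] using hbuf
          subst hb
          simp only [if_true]
          rw [ih]
          simp [hk, pvConsume]
      · have hk : pvKeep c = false := by
          simp [pvKeep, ha]; exact fun h => (hs h).elim
        simp only [camelizeGo, ha, Bool.false_eq_true, if_false, List.filter_cons, hk]
        by_cases h' : (c == ' ') = true
        · exact absurd (by simpa using h') hs
        · simp only [Bool.not_eq_true] at h'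
          simp only [h', Bool.false_eq_true, if_false]
          exact ih buf out

lemma pv_filter_no_underscore (cs : List Char) : '_' ∉ cs.filter pvKeep := by
  intro h
  have := List.of_mem_filter h
  exact absurd this (by decide)

-- ===== VERDICT (by name: the statement is the Claim_ definition above) =====
theorem camelize_py_spec : Claim_equal_camelize_py := by
  intro name _
  unfold Spec_camelize_py camelize_py camelize_py_alt
  simp only []
  rw [PySem.List.foldl_append_if_eq_filter, List.nil_append,
    PySem.Chars.join_nil_singletons,
    show (fun ch => PySem.Chars.isalnum ch || ch == ' ') = pvKeep from rfl,
    pv_replace_id _ (pv_filter_no_underscore name.toList),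
    pv_splitOn_eq, pv_go_spec]
  rfl
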